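-- pv_equiv track=rewrite | github.com/IncredibleQuark/elipticCurvePython | PythonElipticGenerator/PythonElipticGenerator.py | calculate_point
-- ===== SOURCE A (Python) =====
-- def add_points(x1, y1, x2, y2, a, p):
--
--     if x1 != x2:
--         up = (y2 - y1) % p
--         down = (x2 - x1) % p
--         if down == 0:
--             return {"x3": 0, "y3": 0}
--         m = (up // down) % p
--         x3 = (pow(m, 2) - x1 - x2) % p
--         y3 = (m * (x1 - x3) - y1) % p
--         return {"x3": x3, "y3": y3}
--     elif x1 == x2 and y1 != y2:
--         return {"x3": 0, "y3": 0}
--     elif x1 == x2 and y1 == y2 and y1 != 0: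
--         up = (3 * pow(x1, 2) + a) % p
--         down = (2 * y1) % p
--         if down == 0:
--             return {"x3": 0, "y3": 0}
--         m = (up // down) % p
--         x3 = (pow(m, 2) - 2 * x1) % p
--         y3 = (m * (x1 - x3) - y1) % p
--         return {"x3": x3, "y3": y3}
--     elif x1 == x2 and y1 == y2 and y2 == 0:
--         return {"x3": 0, "y3": 0}
--     elif x1 == 0 and y1 == 0:
--         return {"x3": x2, "y3": y2}
--     elif x2 == 0 and y2 == 0:
--         return {"x3": x1, "y3": y1}
--
-- def calculate_point(x1, y1, a, p, n):
--
--     init_point = {"x1": x1, "y1": y1}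
--     result_point = {"x3": x1, "y3": y1}
--     i = 0
--     while i < n:
--         result_point = add_points(result_point["x3"], result_point["y3"], init_point["x1"], init_point["y1"], a, p)
--         i += 1
--
--     return result_point
-- ===== SOURCE B (Python) =====
-- def calculate_point(x1, y1, a, p, n):
--     def step(s):
--         x, y = s
--         if x != x1:
--             num = (y1 - y) % p
--             den = (x1 - x) % p
--             if den == 0:
--                 return (0, 0)
--             m = (num // den) % p
--             x3 = (m * m - x - x1) % p
--             return (x3, (m * (x - x3) - y) % p)
--         if y != y1 or y == 0:
--             return (0, 0)
--         den = (2 * y) % p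
--         if den == 0:
--             return (0, 0)
--         m = (((3 * x * x + a) % p) // den) % p
--         x3 = (m * m - 2 * x) % p
--         return (x3, (m * (x - x3) - y) % p)
--
--     s = (x1, y1)
--     seen = {}
--     i = 0
--     while i < n:
--         if s in seen:
--             period = i - seen[s]
--             for _ in range((n - i) % period):
--                 s = step(s)
--             break
--         seen[s] = i
--         s = step(s)
--         i += 1
--     return {"x3": s[0], "y3": s[1]}
-- ===== Notes on version B (the rewrite author's own statement) =====
-- stated objective: faster
-- what changed: A iterates the point-addition step n times; B detects the cycle of the deterministic state map with a first-visit index dictionary and jumps ahead by reducing the remaining step count modulo the period, making the cost O(tail+period) instead of O(n).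
import Mathlib
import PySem

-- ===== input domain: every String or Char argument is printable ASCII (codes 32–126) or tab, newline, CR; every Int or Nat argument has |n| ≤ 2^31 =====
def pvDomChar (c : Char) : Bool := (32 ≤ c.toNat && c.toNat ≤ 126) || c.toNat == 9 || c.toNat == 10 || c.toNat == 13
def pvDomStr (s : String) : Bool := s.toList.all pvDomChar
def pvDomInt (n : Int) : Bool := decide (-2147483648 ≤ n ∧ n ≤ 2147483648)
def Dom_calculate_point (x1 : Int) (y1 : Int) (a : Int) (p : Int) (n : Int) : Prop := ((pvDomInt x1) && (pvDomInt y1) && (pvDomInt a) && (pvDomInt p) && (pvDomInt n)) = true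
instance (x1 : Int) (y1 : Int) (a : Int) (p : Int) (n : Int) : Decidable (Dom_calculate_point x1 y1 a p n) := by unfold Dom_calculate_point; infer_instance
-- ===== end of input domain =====

-- B replaces A's n-fold iteration of the point-addition step by cycle detection on the
-- deterministic state map (first-visit index dictionary, remaining steps reduced modulo the period).

-- ===== PORT A =====
-- add_points; the Python dicts {"x3":…,"y3":…} with fixed keys are carried as a pair and
-- rendered as the association list at the end of calculate_point.
def addPoints (x1 y1 x2 y2 a p : Int) : Int × Int :=
  if x1 ≠ x2 then
    let up := PySem.Int.mod (y2 - y1) p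
    let down := PySem.Int.mod (x2 - x1) p
    if down = 0 then (0, 0)
    else
      let m := PySem.Int.mod (PySem.Int.floordiv up down) p
      let x3 := PySem.Int.mod (m ^ 2 - x1 - x2) p
      (x3, PySem.Int.mod (m * (x1 - x3) - y1) p)
  else if x1 = x2 ∧ y1 ≠ y2 then (0, 0)
  else if x1 = x2 ∧ y1 = y2 ∧ y1 ≠ 0 then
    let up := PySem.Int.mod (3 * x1 ^ 2 + a) p
    let down := PySem.Int.mod (2 * y1) p
    if down = 0 then (0, 0)
    else
      let m := PySem.Int.mod (PySem.Int.floordiv up down) p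
      let x3 := PySem.Int.mod (m ^ 2 - 2 * x1) p
      (x3, PySem.Int.mod (m * (x1 - x3) - y1) p)
  else if x1 = x2 ∧ y1 = y2 ∧ y2 = 0 then (0, 0)
  else if x1 = 0 ∧ y1 = 0 then (x2, y2)
  else if x2 = 0 ∧ y2 = 0 then (x1, y1)
  else (0, 0)  -- unreachable: the branches above are exhaustive (Python would fall through to None)

-- the while-loop of A: i counts up to n, i.e. max(n,0) iterations
def cpLoopA (x1 y1 a p : Int) : Nat → Int × Int → Int × Int
  | 0, s => s
  | k + 1, s => cpLoopA x1 y1 a p k (addPoints s.1 s.2 x1 y1 a p)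

def calculate_point (x1 : Int) (y1 : Int) (a : Int) (p : Int) (n : Int) : List (String × Int) :=
  let s := cpLoopA x1 y1 a p n.toNat (x1, y1)
  [("x3", s.1), ("y3", s.2)]

-- ===== PORT B =====
-- step: one application of the (broken) point addition with the fixed second point (x1, y1)
def altStep (x1 y1 a p : Int) (s : Int × Int) : Int × Int :=
  let x := s.1
  let y := s.2
  if x ≠ x1 then
    let num := PySem.Int.mod (y1 - y) p
    let den := PySem.Int.mod (x1 - x) p
    if den = 0 then (0, 0)
    else
      let m := PySem.Int.mod (PySem.Int.floordiv num den) p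
      let x3 := PySem.Int.mod (m * m - x - x1) p
      (x3, PySem.Int.mod (m * (x - x3) - y) p)
  else if y ≠ y1 ∨ y = 0 then (0, 0)
  else
    let den := PySem.Int.mod (2 * y) p
    if den = 0 then (0, 0)
    else
      let m := PySem.Int.mod (PySem.Int.floordiv (PySem.Int.mod (3 * x * x + a) p) den) p
      let x3 := PySem.Int.mod (m * m - 2 * x) p
      (x3, PySem.Int.mod (m * (x - x3) - y) p)

-- the 'for _ in range(rem)' tail after the cycle jump
def altRem (x1 y1 a p : Int) : Nat → Int × Int → Int × Int
  | 0, s => s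
  | k + 1, s => altRem x1 y1 a p k (altStep x1 y1 a p s)

-- the main while-loop: seen maps a state to the index of its first visit
def altLoop (x1 y1 a p n : Int) : Nat → PySem.Dict (Int × Int) Int → Int → Int × Int → Int × Int
  | 0, _, _, s => s
  | k + 1, seen, i, s =>
    match seen.get? s with
    | some t => altRem x1 y1 a p (PySem.Int.mod (n - i) (i - t)).toNat s
    | none => altLoop x1 y1 a p n k (seen.insert s i) (i + 1) (altStep x1 y1 a p s)

def calculate_point_alt (x1 : Int) (y1 : Int) (a : Int) (p : Int) (n : Int) : List (String × Int) :=
  let s := altLoop x1 y1 a p n n.toNat PySem.Dict.empty 0 (x1, y1)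
  [("x3", s.1), ("y3", s.2)]

-- ===== PRECONDITION & SPEC =====
-- When p = 0 and at least one loop iteration runs, both Pythons raise ZeroDivisionError ('% p');
-- Pre_ excludes exactly those inputs.
def Pre_calculate_point (x1 : Int) (y1 : Int) (a : Int) (p : Int) (n : Int) : Prop :=
  p ≠ 0 ∨ n ≤ 0
instance (x1 : Int) (y1 : Int) (a : Int) (p : Int) (n : Int) : Decidable (Pre_calculate_point x1 y1 a p n) := by unfold Pre_calculate_point; infer_instance

def pvWitness_calculate_point : Int × Int × Int × Int × Int := (3, 5, 2, 7, 4)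

def Spec_calculate_point (x1 : Int) (y1 : Int) (a : Int) (p : Int) (n : Int) (out : List (String × Int)) : Prop := out = calculate_point_alt x1 y1 a p n
instance (x1 : Int) (y1 : Int) (a : Int) (p : Int) (n : Int) (out : List (String × Int)) : Decidable (Spec_calculate_point x1 y1 a p n out) := by unfold Spec_calculate_point; infer_instance

-- ===== CLAIM (what is proved, stated in full; the proofs are below) =====
def Claim_equal_calculate_point : Prop := ∀ (x1 : Int) (y1 : Int) (a : Int) (p : Int) (n : Int), Dom_calculate_point x1 y1 a p n → Pre_calculate_point x1 y1 a p n → Spec_calculate_point x1 y1 a p n (calculate_point x1 y1 a p n)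

-- ===== LEMMAS AND PROOFS =====

-- A's add_points with fixed second point (x1, y1) is B's step
theorem addPoints_eq_altStep (x1 y1 a p : Int) (s : Int × Int) :
    addPoints s.1 s.2 x1 y1 a p = altStep x1 y1 a p s := by
  simp only [addPoints, altStep, pow_two]
  split_ifs <;> first | rfl | tauto | omega | (rw [mul_assoc])

theorem cpLoopA_eq_iterate (x1 y1 a p : Int) (k : Nat) (s : Int × Int) :
    cpLoopA x1 y1 a p k s = (altStep x1 y1 a p)^[k] s := by
  induction k generalizing s with
  | zero => rfl
  | succ k ih =>
      rw [cpLoopA, ih, addPoints_eq_altStep, Function.iterate_succ_apply]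

theorem altRem_eq_iterate (x1 y1 a p : Int) (k : Nat) (s : Int × Int) :
    altRem x1 y1 a p k s = (altStep x1 y1 a p)^[k] s := by
  induction k generalizing s with
  | zero => rfl
  | succ k ih => rw [altRem, ih, Function.iterate_succ_apply]

-- periodicity: if f^[d] fixes s then iterates from s only depend on the count mod d
theorem iterate_mod_period {α : Type} (f : α → α) (s : α) (d : Nat) (hd : 0 < d)
    (hf : f^[d] s = s) : ∀ m : Nat, f^[m] s = f^[m % d] s := by
  intro m
  induction m using Nat.strong_induction_on with
  | _ m ih =>
    by_cases hm : m < d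
    · rw [Nat.mod_eq_of_lt hm]
    · rw [Nat.not_lt] at hm
      have h1 : m = (m - d) + d := by omega
      have h2 : f^[m] s = f^[m - d] s := by
        conv_lhs => rw [h1]
        rw [Function.iterate_add_apply, hf]
      rw [h2, ih (m - d) (by omega), Nat.mod_eq_sub_mod hm]

-- loop invariant for B's cycle-detecting loop
theorem altLoop_eq_iterate (x1 y1 a p n : Int) :
    ∀ (k : Nat) (seen : PySem.Dict (Int × Int) Int) (i : Int) (s : Int × Int),
      0 ≤ i → i + (k : Int) = (n.toNat : Int) →
      s = (altStep x1 y1 a p)^[i.toNat] (x1, y1) →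
      (∀ st t, seen.get? st = some t → 0 ≤ t ∧ t < i ∧ (altStep x1 y1 a p)^[t.toNat] (x1, y1) = st) →
      altLoop x1 y1 a p n k seen i s = (altStep x1 y1 a p)^[n.toNat] (x1, y1) := by
  set F := altStep x1 y1 a p with hF
  intro k
  induction k with
  | zero =>
      intro seen i s hi hk hs _
      have : i.toNat = n.toNat := by omega
      rw [altLoop, hs, this]
  | succ k ih =>
      intro seen i s hi hk hs hseen
      rw [altLoop]
      cases hget : seen.get? s with
      | some t =>
          dsimp only
          obtain ⟨ht0, hti, hts⟩ := hseen s t hget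
          have hnpos : (0 : Int) < n.toNat := by omega
          have hn : (n.toNat : Int) = n := by omega
          have hni : 0 < n - i := by omega
          have hd : 0 < i - t := by omega
          -- the Python modulus with positive divisor is emod
          have hmod : PySem.Int.mod (n - i) (i - t) = (n - i) % (i - t) :=
            PySem.Int.mod_eq_emod_of_pos hd
          have hdper : F^[(i - t).toNat] s = s := by
            conv_lhs => rw [← hts]
            rw [← Function.iterate_add_apply]
            have e : (i - t).toNat + t.toNat = i.toNat := by omega
            rw [e, ← hs]
          have hNmod : (PySem.Int.mod (n - i) (i - t)).toNat = (n - i).toNat % (i - t).toNat := by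
            rw [hmod]
            have e1 : n - i = ((n - i).toNat : Int) := by omega
            have e2 : i - t = ((i - t).toNat : Int) := by omega
            rw [e1, e2, ← Int.natCast_mod]
            exact Int.toNat_natCast _
          rw [altRem_eq_iterate, hNmod, ← hF,
              ← iterate_mod_period F s (i - t).toNat (by omega) hdper ((n - i).toNat)]
          rw [hs, ← Function.iterate_add_apply]
          congr 1
          omega
      | none =>
          dsimp only
          apply ih (seen.insert s i) (i + 1) (F s) (by omega) (by omega)
          · have : (i + 1).toNat = i.toNat + 1 := by omega
            rw [this, Function.iterate_succ_apply', hs]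
          · intro st t hst
            rw [PySem.Dict.get?_insert] at hst
            by_cases hcase : st = s
            · simp [hcase] at hst
              subst hcase
              refine ⟨by omega, by omega, ?_⟩
              rw [← hst, ← hs]
            · simp [hcase] at hst
              obtain ⟨h1, h2, h3⟩ := hseen st t hst
              exact ⟨h1, by omega, h3⟩

-- ===== VERDICT (by name: the statement is the Claim_ definition above) =====
theorem calculate_point_spec : Claim_equal_calculate_point := by
  intro x1 y1 a p n _ _
  unfold Spec_calculate_point calculate_point calculate_point_alt
  rw [cpLoopA_eq_iterate,
      altLoop_eq_iterate x1 y1 a p n n.toNat PySem.Dict.empty 0 (x1, y1) (le_refl 0)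
        (by omega) (by simp)
        (by intro st t hst; simp [PySem.Dict.get?_empty] at hst)]
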